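-- pv_equiv track=rewrite | github.com/mutjin08/hanaro-react | typehome/14889_스타트와 링크.py | solution
-- ===== SOURCE A (Python) =====
-- from itertools import combinations
--
-- def get_score(s, team):
--     score = 0
--     for i, j in combinations(team, 2):
--         score += s[i][j] + s[j][i]
--     return score
--
-- def solution(n, s):
--     answer = sum(map(sum, s))
--     for starts in combinations(range(n), n//2):
--         links = [i for i in range(n) if i not in starts]
--         startScore = get_score(s, starts)
--         linkScore = get_score(s, links)
--         answer = min(answer, abs(startScore-linkScore))
--     return answer
-- ===== SOURCE B (Python) =====
-- def solution(n, s):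
--     answer = sum(map(sum, s))
--     half = n // 2
--
--     def assign(i, start, link, start_score, link_score):
--         nonlocal answer
--         if i == n:
--             answer = min(answer, abs(start_score - link_score))
--             return
--         if len(start) < half:
--             assign(i + 1, start + [i], link,
--                    start_score + sum(s[i][j] + s[j][i] for j in start),
--                    link_score)
--         if len(link) < n - half:
--             assign(i + 1, start, link + [i],
--                    start_score,
--                    link_score + sum(s[i][j] + s[j][i] for j in link))
--
--     assign(0, [], [], 0, 0)
--     return answer
-- ===== Notes on version B (the rewrite author's own statement) =====
-- stated objective: alternative
-- what changed: Replaces the itertools.combinations enumeration (which rebuilds the link team and recomputes both team scores from scratch for every partition) with a backtracking DFS that assigns each person to one of the two size-bounded teams while accumulating each team's score incrementally as members join.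
import Mathlib
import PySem

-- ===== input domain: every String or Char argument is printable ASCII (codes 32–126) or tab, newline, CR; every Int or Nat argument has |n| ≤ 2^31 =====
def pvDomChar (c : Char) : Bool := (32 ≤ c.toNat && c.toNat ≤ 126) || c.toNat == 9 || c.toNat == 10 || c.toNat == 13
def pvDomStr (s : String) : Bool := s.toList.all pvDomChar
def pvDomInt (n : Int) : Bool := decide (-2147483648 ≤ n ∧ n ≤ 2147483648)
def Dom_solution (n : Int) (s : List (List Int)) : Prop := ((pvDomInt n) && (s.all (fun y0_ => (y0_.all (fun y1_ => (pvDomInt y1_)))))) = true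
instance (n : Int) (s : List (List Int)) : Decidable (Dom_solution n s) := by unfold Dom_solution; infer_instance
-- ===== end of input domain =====

-- B replaces the combinations enumeration by a backtracking DFS that assigns each person
-- to one of the two size-bounded teams with incremental score accumulation; return values
-- proved equal on Pre_.

-- s[i][j] (both ports read cells with the same primitive; in-range on every Pre_ input)
def pvCell (s : List (List Int)) (i j : Int) : Int :=
  (PySem.List.pyGet? ((PySem.List.pyGet? s i).getD []) j).getD 0

-- ===== PORT A =====
-- itertools.combinations(xs, k) in its lexicographic order
def combosA : Nat → List Int → List (List Int)
  | 0, _ => [[]]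
  | _ + 1, [] => []
  | k + 1, x :: xs => ((combosA k xs).map (fun c => x :: c)) ++ combosA (k + 1) xs

def get_score (s : List (List Int)) (team : List Int) : Int :=
  (combosA 2 team).foldl (fun score p =>
    score + (match p with
             | [i, j] => pvCell s i j + pvCell s j i
             | _ => 0)) 0

def solution (n : Int) (s : List (List Int)) : Int :=
  let answer := s.foldl (fun a row => a + row.foldl (· + ·) 0) 0
  let rng := PySem.List.pyRange 0 n 1
  (combosA (PySem.Int.floordiv n 2).toNat rng).foldl (fun answer starts =>
    let links := rng.filter (fun i => !(starts.contains i))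
    let startScore := get_score s starts
    let linkScore := get_score s links
    min answer |startScore - linkScore|) answer

-- ===== PORT B =====
-- sum(s[i][j] + s[j][i] for j in team)
def addScore (s : List (List Int)) (i : Int) (team : List Int) : Int :=
  team.foldl (fun t j => t + (pvCell s i j + pvCell s j i)) 0

-- the DFS 'assign' of Source B, walking the remaining people in order, threading 'answer'
def assignB (s : List (List Int)) (n half : Int) :
    List Int → List Int → List Int → Int → Int → Int → Int
  -- people exhausted: Python's 'i == n' test (i = people assigned so far; when the walked
  -- range(0, n) is exhausted this holds exactly when 0 ≤ n)
  | [], _, _, ss, ls, answer => if 0 ≤ n then min answer |ss - ls| else answer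
  | i :: rest, start, link, ss, ls, answer =>
    let a1 := if (start.length : Int) < half
      then assignB s n half rest (start ++ [i]) link (ss + addScore s i start) ls answer
      else answer
    if (link.length : Int) < n - half
      then assignB s n half rest start (link ++ [i]) ss (ls + addScore s i link) a1
      else a1

def solution_alt (n : Int) (s : List (List Int)) : Int :=
  let answer := s.foldl (fun a row => a + row.foldl (· + ·) 0) 0
  let half := PySem.Int.floordiv n 2
  assignB s n half (PySem.List.pyRange 0 n 1) [] [] 0 0 answer

-- ===== PRECONDITION & SPEC =====
-- Exactly where the Python A returns: n ≥ 0 (combinations raises ValueError for a negative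
-- team size n//2), and for n ≥ 3 (teams then contain pairs, so every cell s[i][j], i ≠ j < n,
-- is read) the matrix must be large enough: n rows, row i readable up to the largest partner
-- index (n-1, except n-2 for the last row); otherwise A raises IndexError.
def Pre_solution (n : Int) (s : List (List Int)) : Prop :=
  0 ≤ n ∧ (n ≤ 2 ∨
    (n ≤ (s.length : Int) ∧
      ∀ i ∈ List.range n.toNat,
        (if (i : Int) = n - 1 then n - 1 else n) ≤ ((s.getD i []).length : Int)))
instance (n : Int) (s : List (List Int)) : Decidable (Pre_solution n s) := by
  unfold Pre_solution; infer_instance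

def pvWitness_solution : Int × List (List Int) := (4, [[0, 1, 2, 3], [4, 0, 5, 6], [7, 8, 0, 9], [1, 2, 3, 0]])

def Spec_solution (n : Int) (s : List (List Int)) (out : Int) : Prop := out = solution_alt n s
instance (n : Int) (s : List (List Int)) (out : Int) : Decidable (Spec_solution n s out) := by unfold Spec_solution; infer_instance

-- ===== CLAIM (what is proved, stated in full; the proofs are below) =====
def Claim_equal_solution : Prop := ∀ (n : Int) (s : List (List Int)), Dom_solution n s → Pre_solution n s → Spec_solution n s (solution n s)

-- ===== LEMMAS AND PROOFS =====

-- the tree of (start, link) pairs the DFS visits, same branching conditions as assignB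
def pvExt (n half : Int) : List Int → List Int → List Int → List (List Int × List Int)
  | [], start, link => [(start, link)]
  | i :: rest, start, link =>
    (if (start.length : Int) < half then pvExt n half rest (start ++ [i]) link else []) ++
    (if (link.length : Int) < n - half then pvExt n half rest start (link ++ [i]) else [])

theorem combosA_nil_of_lt : ∀ (xs : List Int) (k : Nat), xs.length < k → combosA k xs = [] := by
  intro xs
  induction xs with
  | nil =>
    intro k h
    match k, h with
    | k + 1, _ => rfl
  | cons x xs ih =>
    intro k h
    match k, h with
    | k + 1, h =>
      simp only [combosA]
      rw [ih k (by simp at h; omega), ih (k + 1) (by simp at h ⊢; omega)]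
      rfl

theorem combosA_subset : ∀ (k : Nat) (xs c : List Int), c ∈ combosA k xs → ∀ x ∈ c, x ∈ xs := by
  intro k
  induction k with
  | zero =>
    intro xs c hc x hx
    simp [combosA] at hc
    subst hc; simp at hx
  | succ k ih =>
    intro xs
    induction xs with
    | nil => intro c hc; simp [combosA] at hc
    | cons y ys ihy =>
      intro c hc x hx
      simp only [combosA, List.mem_append, List.mem_map] at hc
      rcases hc with ⟨c', hc', rfl⟩ | hc
      · rcases List.mem_cons.mp hx with rfl | hx
        · simp
        · exact List.mem_cons_of_mem _ (ih ys c' hc' x hx)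
      · exact List.mem_cons_of_mem _ (ihy c hc x hx)

-- (a ++ b) ++ (c ++ d) ~ (a ++ c) ++ (b ++ d)
theorem pv_perm_mid {α : Type} (a b c d : List α) :
    ((a ++ b) ++ (c ++ d)).Perm ((a ++ c) ++ (b ++ d)) := by
  simp only [List.append_assoc]
  refine List.Perm.append_left a ?_
  rw [← List.append_assoc, ← List.append_assoc]
  exact ((List.perm_append_comm ..).append_right d).trans (by simp [List.append_assoc])

-- combinations of xs ++ [i]: those not using i, then those using i (as a permutation)
theorem combosA_append_singleton_perm :
    ∀ (xs : List Int) (k : Nat) (i : Int),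
      (combosA (k + 1) (xs ++ [i])).Perm
        (combosA (k + 1) xs ++ (combosA k xs).map (fun c => c ++ [i])) := by
  intro xs
  induction xs with
  | nil =>
    intro k i
    cases k with
    | zero => simp [combosA]
    | succ k => simp [combosA]
  | cons x xs ih =>
    intro k i
    cases k with
    | zero =>
      simp only [List.cons_append, combosA]
      refine List.Perm.trans (List.Perm.append_left _ (ih 0 i)) ?_
      exact List.Perm.of_eq (by simp [combosA])
    | succ k =>
      simp only [List.cons_append, combosA, List.map_append, List.map_map, Function.comp_def]
      refine List.Perm.trans ?_ (pv_perm_mid _ _ _ _)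
      simpa only [List.map_append, List.map_map, Function.comp_def, List.cons_append] using
        (((ih k i).map (fun c => x :: c)).append (ih (k + 1) i))

theorem get_score_eq_sum (s : List (List Int)) (team : List Int) :
    get_score s team =
      ((combosA 2 team).map (fun p =>
        match p with
        | [i, j] => pvCell s i j + pvCell s j i
        | _ => 0)).sum := by
  simpa using PySem.List.foldl_add (a := 0)
    (g := fun p => match p with | [i, j] => pvCell s i j + pvCell s j i | _ => 0)
    (l := combosA 2 team)

theorem addScore_eq_sum (s : List (List Int)) (i : Int) (team : List Int) :
    addScore s i team = (team.map (fun j => pvCell s i j + pvCell s j i)).sum := by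
  simpa using PySem.List.foldl_add (a := 0)
    (g := fun j => pvCell s i j + pvCell s j i) (l := team)

-- incremental scoring: adding person i to a team adds its pair sums with the members
theorem get_score_append (s : List (List Int)) (team : List Int) (i : Int) :
    get_score s (team ++ [i]) = get_score s team + addScore s i team := by
  rw [get_score_eq_sum, get_score_eq_sum, addScore_eq_sum]
  have hperm := (combosA_append_singleton_perm team 1 i).map
    (fun p => match p with | [i, j] => pvCell s i j + pvCell s j i | _ => 0)
  rw [hperm.sum_eq, List.map_append, List.sum_append]
  congr 1
  -- combosA 1 team = team.map (fun j => [j])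
  have h1 : ∀ (t : List Int), combosA 1 t = t.map (fun j => [j]) := by
    intro t
    induction t with
    | nil => rfl
    | cons y ys ih => simp [combosA, ih]
  rw [h1, List.map_map, List.map_map]
  refine congrArg List.sum (List.map_congr_left ?_)
  intro j _
  simp only [Function.comp_def, List.cons_append, List.nil_append]
  exact Int.add_comm _ _

-- the DFS equals a min-fold over the visited leaves
theorem assignB_eq_foldl (s : List (List Int)) (n half : Int) (hn : 0 ≤ n) :
    ∀ (rest start link : List Int) (answer : Int),
      assignB s n half rest start link (get_score s start) (get_score s link) answer =
        (pvExt n half rest start link).foldl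
          (fun ans p => min ans |get_score s p.1 - get_score s p.2|) answer := by
  intro rest
  induction rest with
  | nil => intro start link answer; simp [assignB, pvExt, hn]
  | cons i rest ih =>
    intro start link answer
    simp only [assignB, pvExt, List.foldl_append]
    by_cases hA : (start.length : Int) < half
    · by_cases hB : (link.length : Int) < n - half
      · simp only [hA, hB, if_true]
        rw [← get_score_append, ih, ← get_score_append, ih]
      · simp only [hA, hB, if_true, if_false, List.foldl_nil]
        rw [← get_score_append, ih]
    · by_cases hB : (link.length : Int) < n - half
      · simp only [hA, hB, if_true, if_false, List.foldl_nil]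
        rw [← get_score_append, ih]
      · simp only [hA, hB, if_false, List.foldl_nil]

-- the DFS visits exactly the size-half combinations (with their complements), in order
theorem pvExt_eq_combos (n half : Int) :
    ∀ (rest start link : List Int), rest.Nodup →
      (start.length : Int) ≤ half → (link.length : Int) ≤ n - half →
      (half - start.length) + ((n - half) - link.length) = rest.length →
      pvExt n half rest start link =
        (combosA (half - start.length).toNat rest).map
          (fun c => (start ++ c, link ++ rest.filter (fun x => !(c.contains x)))) := by
  intro rest
  induction rest with
  | nil =>
    intro start link _ h1 h2 h3
    have : (half - start.length).toNat = 0 := by simp at h3; omega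
    simp [pvExt, this, combosA]
  | cons i rest ih =>
    intro start link hnd h1 h2 h3
    have hndr : rest.Nodup := (List.nodup_cons.mp hnd).2
    have hir : i ∉ rest := (List.nodup_cons.mp hnd).1
    simp only [pvExt]
    by_cases hA : (start.length : Int) < half
    · obtain ⟨k', hk⟩ : ∃ k', (half - start.length).toNat = k' + 1 :=
        ⟨(half - start.length).toNat - 1, by omega⟩
      rw [hk]
      simp only [combosA, List.map_append, List.map_map, if_pos hA]
      congr 1
      · -- include i in start
        rw [ih (start ++ [i]) link hndr (by simp; omega) h2 (by simp at h3 ⊢; omega)]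
        have hk' : (half - ((start ++ [i]).length : Int)).toNat = k' := by simp; omega
        rw [hk']
        refine List.map_congr_left ?_
        intro c hc
        have hfilt : (i :: rest).filter (fun x => !((i :: c).contains x)) =
            rest.filter (fun x => !(c.contains x)) := by
          rw [List.filter_cons]
          have hii : ((i :: c).contains i) = true := by simp
          simp only [hii, Bool.not_true]
          refine List.filter_congr ?_
          intro x hx
          have hxi : x ≠ i := fun h => hir (h ▸ hx)
          simp [hxi]
        simp only [Function.comp_def, hfilt, List.append_assoc, List.singleton_append]
      · -- i goes to link
        by_cases hB : (link.length : Int) < n - half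
        · rw [if_pos hB, ih start (link ++ [i]) hndr (by omega) (by simp; omega)
              (by simp at h3 ⊢; omega), hk]
          refine List.map_congr_left ?_
          intro c hc
          have hic : i ∉ c := fun h => hir (combosA_subset (k' + 1) rest c hc i h)
          have hfilt : (i :: rest).filter (fun x => !(c.contains x)) =
              i :: rest.filter (fun x => !(c.contains x)) := by
            rw [List.filter_cons]
            have : (c.contains i) = false := by simpa using hic
            simp [hic]
          rw [hfilt]
          simp [List.append_assoc]
        · rw [if_neg hB]
          have hnil : combosA (k' + 1) rest = [] := by
            apply combosA_nil_of_lt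
            simp at h3; omega
          simp [hnil]
    · have hk0 : (half - (start.length : Int)).toNat = 0 := by omega
      rw [hk0]
      have hB : (link.length : Int) < n - half := by simp at h3; omega
      simp only [combosA, if_neg hA, if_pos hB, List.nil_append]
      rw [ih start (link ++ [i]) hndr (by omega) (by simp; omega) (by simp at h3 ⊢; omega)]
      rw [hk0]
      simp [combosA]

-- ===== VERDICT (by name: the statement is the Claim_ definition above) =====
theorem solution_spec : Claim_equal_solution := by
  intro n s _hdom hpre
  obtain ⟨hn, -⟩ := hpre
  unfold Spec_solution solution solution_alt
  have hhalf : PySem.Int.floordiv n 2 = n / 2 :=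
    PySem.Int.floordiv_eq_ediv_of_pos (by norm_num)
  have hb1 : (0 : Int) ≤ PySem.Int.floordiv n 2 := by rw [hhalf]; omega
  have hb2 : PySem.Int.floordiv n 2 ≤ n := by rw [hhalf]; omega
  have hg0 : get_score s [] = 0 := rfl
  have hB := assignB_eq_foldl s n (PySem.Int.floordiv n 2) hn
    (PySem.List.pyRange 0 n 1) [] [] (s.foldl (fun a row => a + row.foldl (· + ·) 0) 0)
  rw [hg0] at hB
  have hE := pvExt_eq_combos n (PySem.Int.floordiv n 2)
    (PySem.List.pyRange 0 n 1) [] [] (PySem.List.nodup_pyRange_one 0 n)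
    (by simpa using hb1) (by simpa using hb2)
    (by rw [PySem.List.length_pyRange_one]; simp; omega)
  rw [hE] at hB
  simp only [hB, List.foldl_map, List.length_nil, Int.natCast_zero, Int.sub_zero,
    List.nil_append]
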